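-- pv_equiv track=rewrite | github.com/agrawal-prateek/Global-Hiring-Challenge-by-Connect-Job | Almost Vowel.py | find_almost_vowel
-- ===== SOURCE A (Python) =====
-- def find_almost_vowel(string):
--     vowels = {'a', 'e', 'i', 'o', 'u'}
--     big_number = 0
--     left_length = 0
--     right_length = 0
--     for character in string:
--         if character in vowels:
--             left_length += 1
--         else:
--             break
--     if left_length == len(string):
--         return len(string)
--     for index in range(len(string) - 1, -1, -1):
--         if string[index] in vowels:
--             right_length += 1
--         else:
--             break
--     string = string[left_length:len(string) - right_length]
--     temp_big = 0
--     for character in string: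
--         if character in vowels:
--             temp_big += 1
--         else:
--             if temp_big > big_number:
--                 big_number = temp_big
--             temp_big = 0
--     if temp_big > big_number:
--         big_number = temp_big
--     return big_number + left_length + right_length
-- ===== SOURCE B (Python) =====
-- def find_almost_vowel(string):
--     vowels = {'a', 'e', 'i', 'o', 'u'}
--     # one pass: lengths of the maximal vowel runs
--     runs = []
--     cur = 0
--     for ch in string:
--         if ch in vowels:
--             cur += 1
--         else:
--             if cur:
--                 runs.append(cur)
--             cur = 0
--     if cur:
--         runs.append(cur)
--     if len(runs) == 1 and runs[0] == len(string):
--         return len(string)  # entirely vowels (empty string has no runs)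
--     left = runs[0] if string and string[0] in vowels else 0
--     right = runs[-1] if string and string[-1] in vowels else 0
--     interior = runs[(1 if left else 0):len(runs) - (1 if right else 0)]
--     best = max(interior) if interior else 0
--     return left + right + best
-- ===== Notes on version B (the rewrite author's own statement) =====
-- stated objective: alternative
-- what changed: A makes three separate scans (a prefix-vowel loop, a backwards index loop for the suffix, then a max-run loop over the sliced-out middle); B scans the string once collecting the lengths of all maximal vowel runs and assembles the answer from that list (first run if leading, last run if trailing, max of the interior runs).
import Mathlib
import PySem

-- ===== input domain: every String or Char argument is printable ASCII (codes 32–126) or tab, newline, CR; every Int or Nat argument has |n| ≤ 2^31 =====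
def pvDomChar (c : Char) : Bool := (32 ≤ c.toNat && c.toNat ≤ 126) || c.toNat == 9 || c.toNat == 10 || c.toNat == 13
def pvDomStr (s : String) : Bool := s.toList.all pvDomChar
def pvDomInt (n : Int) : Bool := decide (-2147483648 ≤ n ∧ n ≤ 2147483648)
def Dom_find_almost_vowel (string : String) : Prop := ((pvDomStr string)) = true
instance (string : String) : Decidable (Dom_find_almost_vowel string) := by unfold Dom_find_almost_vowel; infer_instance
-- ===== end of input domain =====

-- B rebuilds the answer from the list of maximal vowel-run lengths collected in one pass,
-- where A makes three separate scans (prefix loop, suffix index loop, middle max-run loop); objective: alternative decomposition.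

-- ===== PORT A =====
def pvVowel (c : Char) : Bool := c == 'a' || c == 'e' || c == 'i' || c == 'o' || c == 'u'

-- 'for character in string: if vowel: left_length += 1 else: break'
def pvLeftLoop : List Char → Int → Int
  | [], acc => acc
  | c :: rest, acc => if pvVowel c then pvLeftLoop rest (acc + 1) else acc

-- 'for index in range(len(string)-1, -1, -1): …' (pyGet? never returns none here: every produced index is in range)
def pvRightLoop (l : List Char) : List Int → Int → Int
  | [], acc => acc
  | i :: rest, acc =>
    match PySem.List.pyGet? l i with
    | some c => if pvVowel c then pvRightLoop l rest (acc + 1) else acc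
    | none => acc

-- the middle loop carrying (big_number, temp_big), ending with the final 'if temp_big > big_number' check
def pvMidLoop : List Char → Int → Int → Int
  | [], big, temp => if temp > big then temp else big
  | c :: rest, big, temp =>
    if pvVowel c then pvMidLoop rest big (temp + 1)
    else pvMidLoop rest (if temp > big then temp else big) 0

def find_almost_vowel (string : String) : Int :=
  let l := string.toList
  let left := pvLeftLoop l 0
  if left = (l.length : Int) then (l.length : Int)
  else
    let right := pvRightLoop l (PySem.List.pyRange ((l.length : Int) - 1) (-1) (-1)) 0
    let mid := PySem.List.slice l (some left) (some ((l.length : Int) - right))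
    pvMidLoop mid 0 0 + left + right

-- ===== PORT B =====
-- one pass accumulating (runs, cur): on a consonant flush cur (if nonzero) onto runs
def pvRunsStep (st : List Int × Int) (c : Char) : List Int × Int :=
  if pvVowel c then (st.1, st.2 + 1)
  else (if st.2 ≠ 0 then st.1 ++ [st.2] else st.1, 0)

def find_almost_vowel_alt (string : String) : Int :=
  let l := string.toList
  let st := l.foldl pvRunsStep ([], 0)
  let runs := if st.2 ≠ 0 then st.1 ++ [st.2] else st.1
  if runs.length = 1 ∧ PySem.List.pyGetD runs 0 0 = (l.length : Int) then (l.length : Int)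
  else
    -- 'runs[0] if string and string[0] in vowels else 0' (runs is nonempty whenever that test holds)
    let left := match PySem.List.pyGet? l 0 with
      | some c => if pvVowel c then PySem.List.pyGetD runs 0 0 else 0
      | none => 0
    let right := match PySem.List.pyGet? l (-1) with
      | some c => if pvVowel c then PySem.List.pyGetD runs (-1) 0 else 0
      | none => 0
    let interior := PySem.List.slice runs (some (if left ≠ 0 then 1 else 0))
        (some ((runs.length : Int) - (if right ≠ 0 then 1 else 0)))
    let best := match PySem.List.max? interior (fun y => y) with
      | some m => m
      | none => 0
    left + right + best

-- ===== PRECONDITION & SPEC =====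
def Spec_find_almost_vowel (string : String) (out : Int) : Prop := out = find_almost_vowel_alt string
instance (string : String) (out : Int) : Decidable (Spec_find_almost_vowel string out) := by unfold Spec_find_almost_vowel; infer_instance

-- ===== CLAIM (what is proved, stated in full; the proofs are below) =====
def Claim_equal_find_almost_vowel : Prop := ∀ (string : String), Dom_find_almost_vowel string → Spec_find_almost_vowel string (find_almost_vowel string)

-- ===== LEMMAS AND PROOFS =====

-- the list of maximal vowel-run lengths of l, given a current open run of length cur
def pvPushIf (cur : Int) : List Int := if cur ≠ 0 then [cur] else []

def pvRuns : List Char → Int → List Int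
  | [], cur => pvPushIf cur
  | c :: rest, cur => if pvVowel c then pvRuns rest (cur + 1) else pvPushIf cur ++ pvRuns rest 0

-- the common reference value both ports are reduced to
def pvRef (l : List Char) : Int :=
  let a := (l.takeWhile pvVowel).length
  if a = l.length then (l.length : Int)
  else
    let b := (l.reverse.takeWhile pvVowel).length
    (a : Int) + (b : Int) + (pvRuns ((l.take (l.length - b)).drop a) 0).foldl max 0

theorem pvRuns_fold (l : List Char) : ∀ (acc : List Int) (cur : Int),
    (if (List.foldl pvRunsStep (acc, cur) l).2 ≠ 0
      then (List.foldl pvRunsStep (acc, cur) l).1 ++ [(List.foldl pvRunsStep (acc, cur) l).2]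
      else (List.foldl pvRunsStep (acc, cur) l).1) = acc ++ pvRuns l cur := by
  induction l with
  | nil =>
    intro acc cur
    by_cases h : cur = 0 <;> simp [pvRuns, pvPushIf, h]
  | cons c rest ih =>
    intro acc cur
    by_cases hv : pvVowel c
    · simp only [List.foldl_cons, pvRunsStep, hv, if_true, pvRuns, ih]
    · simp only [List.foldl_cons, pvRunsStep, hv, if_false, Bool.false_eq_true, ih, pvRuns]
      by_cases h : cur = 0 <;> simp [pvPushIf, h]

theorem pvLeftLoop_eq (l : List Char) : ∀ acc : Int,
    pvLeftLoop l acc = acc + ((l.takeWhile pvVowel).length : Int) := by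
  induction l with
  | nil => intro acc; simp [pvLeftLoop]
  | cons c rest ih =>
    intro acc
    by_cases hv : pvVowel c
    · simp only [pvLeftLoop, hv, if_true, List.takeWhile_cons, ih, List.length_cons]
      push_cast; omega
    · simp [pvLeftLoop, hv]

theorem pvRightLoop_eq (l : List Char) : ∀ (m : Nat), m ≤ l.length → ∀ acc : Int,
    pvRightLoop l (PySem.List.pyRange ((m : Int) - 1) (-1) (-1)) acc
      = acc + (((l.take m).reverse.takeWhile pvVowel).length : Int) := by
  intro m
  induction m with
  | zero =>
    intro _ acc
    rw [PySem.List.pyRange_neg_one_eq_nil (by norm_num)]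
    simp [pvRightLoop]
  | succ k ih =>
    intro hk acc
    have hk' : k < l.length := by omega
    have h1 : ((k + 1 : Nat) : Int) - 1 = (k : Int) := by push_cast; ring
    rw [h1, PySem.List.pyRange_neg_one_cons (by omega)]
    have hget : PySem.List.pyGet? l (k : Int) = some l[k] := by
      simp [PySem.List.pyGet?_natCast, List.getElem?_eq_getElem hk']
    have htake : l.take (k + 1) = l.take k ++ [l[k]] := by
      rw [List.take_add_one, List.getElem?_eq_getElem hk']; rfl
    simp only [pvRightLoop, hget]
    by_cases hv : pvVowel l[k]
    · rw [if_pos hv, ih (by omega), htake]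
      simp only [List.reverse_append, List.reverse_cons, List.reverse_nil, List.nil_append,
        List.singleton_append, List.takeWhile_cons, hv, if_true, List.length_cons]
      push_cast; omega
    · rw [if_neg (by simp [hv]), htake]
      rw [Bool.not_eq_true] at hv
      simp only [List.reverse_append, List.reverse_cons, List.reverse_nil, List.nil_append,
        List.singleton_append, List.takeWhile_cons, hv, Bool.false_eq_true, if_false,
        List.length_nil]
      push_cast; omega

theorem pvMaxFlush (big temp : Int) (hb : 0 ≤ big) :
    List.foldl max big (pvPushIf temp) = if temp > big then temp else big := by
  by_cases h : temp = 0
  · subst h; simp [pvPushIf]; intro h'; omega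
  · simp [pvPushIf, h]
    rcases le_total big temp with h' | h'
    · rw [max_eq_right h']; by_cases he : temp = big
      · subst he; simp
      · rw [if_pos (by omega)]
    · rw [max_eq_left h', if_neg (by omega)]

theorem pvMidLoop_eq (l : List Char) : ∀ (big temp : Int), 0 ≤ big → 0 ≤ temp →
    pvMidLoop l big temp = (pvRuns l temp).foldl max big := by
  induction l with
  | nil =>
    intro big temp hb _
    simp only [pvMidLoop, pvRuns]
    rw [pvMaxFlush big temp hb]
  | cons c rest ih =>
    intro big temp hb ht
    by_cases hv : pvVowel c
    · simp only [pvMidLoop, hv, if_true, pvRuns]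
      exact ih big (temp + 1) hb (by omega)
    · simp only [pvMidLoop, hv, Bool.false_eq_true, if_false, pvRuns, List.foldl_append]
      rw [pvMaxFlush big temp hb]
      exact ih _ 0 (by split_ifs <;> omega) le_rfl

theorem pvRuns_vowel_prefix (t : List Char) : ∀ (xs : List Char) (cur : Int),
    (∀ c ∈ t, pvVowel c = true) → pvRuns (t ++ xs) cur = pvRuns xs (cur + t.length) := by
  induction t with
  | nil => intro xs cur _; simp
  | cons c rest ih =>
    intro xs cur hall
    have hv : pvVowel c := hall c (by simp)
    simp only [List.cons_append, pvRuns, hv, if_true]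
    rw [ih xs (cur + 1) (fun x hx => hall x (by simp [hx]))]
    congr 1
    simp only [List.length_cons]
    push_cast; omega

theorem pvRuns_split (zs : List Char) : ∀ (c : Char) (ys : List Char) (cur : Int),
    pvVowel c = false → pvRuns ((zs ++ [c]) ++ ys) cur = pvRuns (zs ++ [c]) cur ++ pvRuns ys 0 := by
  induction zs with
  | nil => intro c ys cur hc; simp [pvRuns, hc, pvPushIf]
  | cons z rest ih =>
    intro c ys cur hc
    by_cases hv : pvVowel z
    · simp only [List.cons_append, pvRuns, hv, if_true]
      exact ih c ys (cur + 1) hc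
    · simp only [List.cons_append, pvRuns, hv, Bool.false_eq_true, if_false]
      rw [ih c ys 0 hc, List.append_assoc]

theorem pvRuns_cons_consonant (c : Char) (xs : List Char) (cur : Int) (hc : pvVowel c = false) :
    pvRuns (c :: xs) cur = pvPushIf cur ++ pvRuns (c :: xs) 0 := by
  simp [pvRuns, hc, pvPushIf]

theorem pvRuns_sum (l : List Char) : ∀ cur : Int, 0 ≤ cur →
    (pvRuns l cur).sum = cur + (l.countP pvVowel : Int) := by
  induction l with
  | nil =>
    intro cur _
    by_cases h : cur = 0 <;> simp [pvRuns, pvPushIf, h]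
  | cons c rest ih =>
    intro cur hcur
    by_cases hv : pvVowel c
    · simp only [pvRuns, hv, if_true]
      rw [ih (cur + 1) (by omega)]
      simp only [List.countP_cons, hv, if_true]
      push_cast; omega
    · simp only [pvRuns, hv, Bool.false_eq_true, if_false, List.sum_append]
      rw [ih 0 le_rfl]
      simp only [List.countP_cons, hv, Bool.false_eq_true, if_false]
      by_cases h : cur = 0 <;> simp [pvPushIf, h]

theorem pvRuns_pos (l : List Char) : ∀ (cur x : Int), 0 ≤ cur → x ∈ pvRuns l cur → 0 < x := by
  induction l with
  | nil =>
    intro cur x hcur hx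
    simp only [pvRuns, pvPushIf] at hx
    split_ifs at hx <;> simp at hx
    omega
  | cons c rest ih =>
    intro cur x hcur hx
    by_cases hv : pvVowel c
    · simp only [pvRuns, hv, if_true] at hx
      exact ih (cur + 1) x (by omega) hx
    · simp only [pvRuns, hv, Bool.false_eq_true, if_false, List.mem_append] at hx
      rcases hx with hx | hx
      · simp only [pvPushIf] at hx; split_ifs at hx <;> simp at hx; omega
      · exact ih 0 x le_rfl hx

theorem pvMaxD_eq_foldl (xs : List Int) (hpos : ∀ x ∈ xs, 0 ≤ x) :
    (match PySem.List.max? xs (fun y => y) with | some m => m | none => 0) = xs.foldl max 0 := by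
  cases xs with
  | nil => simp [PySem.List.max?]
  | cons x t =>
    rw [PySem.List.max?_id_cons]
    simp only [List.foldl_cons]
    rw [max_eq_right (hpos x (by simp))]

theorem pvInterior (X : List Int) (A B : Int) :
    PySem.List.slice (pvPushIf A ++ X ++ pvPushIf B) (some (if A ≠ 0 then 1 else 0))
      (some (((pvPushIf A ++ X ++ pvPushIf B).length : Int) - (if B ≠ 0 then 1 else 0))) = X := by
  by_cases hA : A = 0 <;> by_cases hB : B = 0
  · rw [if_neg (by simp [hA]), if_neg (by simp [hB])]
    rw [show pvPushIf A = [] from by simp [pvPushIf, hA],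
      show pvPushIf B = [] from by simp [pvPushIf, hB]]
    simp only [List.nil_append, List.append_nil, sub_zero]
    rw [show (0 : Int) = ((0 : Nat) : Int) from by norm_num, PySem.List.slice_natCast]
    simp
  · rw [if_neg (by simp [hA]), if_pos hB]
    rw [show pvPushIf A = [] from by simp [pvPushIf, hA],
      show pvPushIf B = [B] from by unfold pvPushIf; rw [if_pos hB]]
    simp only [List.nil_append]
    rw [show ((X ++ [B]).length : Int) - 1 = ((X.length : Nat) : Int) from by
      simp only [List.length_append, List.length_cons, List.length_nil]; push_cast; ring]
    rw [show (0 : Int) = ((0 : Nat) : Int) from by norm_num, PySem.List.slice_natCast]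
    simp
  · rw [if_pos hA, if_neg (by simp [hB])]
    rw [show pvPushIf A = [A] from by unfold pvPushIf; rw [if_pos hA],
      show pvPushIf B = [] from by simp [pvPushIf, hB]]
    simp only [List.append_nil, List.singleton_append, sub_zero]
    rw [show ((A :: X).length : Int) = ((X.length + 1 : Nat) : Int) from by
      simp only [List.length_cons]]
    rw [show (1 : Int) = ((1 : Nat) : Int) from by norm_num, PySem.List.slice_natCast]
    simp
  · rw [if_pos hA, if_pos hB]
    rw [show pvPushIf A = [A] from by unfold pvPushIf; rw [if_pos hA],
      show pvPushIf B = [B] from by unfold pvPushIf; rw [if_pos hB]]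
    simp only [List.cons_append, List.nil_append]
    rw [show ((A :: (X ++ [B])).length : Int) - 1 = (((X ++ [B]).length : Nat) : Int) from by
      simp only [List.length_cons]; push_cast; ring]
    rw [show (1 : Int) = ((1 : Nat) : Int) from by norm_num, PySem.List.slice_natCast]
    simp only [List.drop_succ_cons, List.drop_zero]
    rw [show (X ++ [B]).length - 1 = X.length from by simp]
    exact List.take_left ..

-- decomposition of a not-all-vowel list: vowel prefix t, middle m starting and ending with a consonant, vowel suffix tr
theorem pvDecomp (l : List Char) (hnot : ¬ ∀ c ∈ l, pvVowel c = true) :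
    ∃ (t m tr : List Char), l = t ++ m ++ tr ∧ (∀ c ∈ t, pvVowel c = true) ∧ (∀ c ∈ tr, pvVowel c = true) ∧
      t = l.takeWhile pvVowel ∧ tr.length = (l.reverse.takeWhile pvVowel).length ∧
      (∃ (zs : List Char) (c : Char), m = zs ++ [c] ∧ pvVowel c = false) ∧
      (∃ (c : Char) (ws : List Char), m = c :: ws ∧ pvVowel c = false) := by
  have hld : l = l.takeWhile pvVowel ++ l.dropWhile pvVowel := (List.takeWhile_append_dropWhile).symm
  have hdne : l.dropWhile pvVowel ≠ [] := fun h => hnot (List.dropWhile_eq_nil_iff.mp h)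
  obtain ⟨cd, wd, hcd⟩ := List.exists_cons_of_ne_nil hdne
  have hcdv : pvVowel cd = false := by
    have h := List.head_dropWhile_not pvVowel hdne
    simp only [hcd, List.head_cons] at h
    exact h
  have hrne : (l.dropWhile pvVowel).reverse.dropWhile pvVowel ≠ [] := by
    intro h
    have hall := List.dropWhile_eq_nil_iff.mp h
    have hmem : cd ∈ (l.dropWhile pvVowel).reverse := by rw [List.mem_reverse, hcd]; simp
    have := hall cd hmem
    rw [hcdv] at this; cases this
  obtain ⟨c0, ws0, hc0⟩ := List.exists_cons_of_ne_nil hrne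
  have hc0v : pvVowel c0 = false := by
    have h := List.head_dropWhile_not pvVowel hrne
    simp only [hc0, List.head_cons] at h
    exact h
  have hdrev : (l.dropWhile pvVowel).reverse
      = (l.dropWhile pvVowel).reverse.takeWhile pvVowel ++ (l.dropWhile pvVowel).reverse.dropWhile pvVowel :=
    (List.takeWhile_append_dropWhile).symm
  have hdeq : l.dropWhile pvVowel
      = ((l.dropWhile pvVowel).reverse.dropWhile pvVowel).reverse
        ++ ((l.dropWhile pvVowel).reverse.takeWhile pvVowel).reverse := by
    have h := congrArg List.reverse hdrev
    rw [List.reverse_reverse, List.reverse_append] at h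
    exact h
  refine ⟨l.takeWhile pvVowel, ((l.dropWhile pvVowel).reverse.dropWhile pvVowel).reverse,
    ((l.dropWhile pvVowel).reverse.takeWhile pvVowel).reverse, ?_, ?_, ?_, rfl, ?_, ?_, ?_⟩
  · rw [List.append_assoc, ← hdeq]; exact hld
  · exact fun c hc => List.mem_takeWhile_imp hc
  · intro c hc; rw [List.mem_reverse] at hc; exact List.mem_takeWhile_imp hc
  · -- suffix length equals the takeWhile of l.reverse
    have hlrev : l.reverse = (l.dropWhile pvVowel).reverse ++ (l.takeWhile pvVowel).reverse := by
      conv_lhs => rw [hld]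
      simp
    have hlen2 : ((l.dropWhile pvVowel).reverse.takeWhile pvVowel).length
        ≠ (l.dropWhile pvVowel).reverse.length := by
      intro hlen
      have hpre := List.takeWhile_prefix (l := (l.dropWhile pvVowel).reverse) pvVowel
      have heq := List.IsPrefix.eq_of_length hpre hlen
      have : (l.dropWhile pvVowel).reverse.dropWhile pvVowel = [] := by
        apply List.dropWhile_eq_nil_iff.mpr
        intro x hx
        exact List.mem_takeWhile_imp (by rw [heq]; exact hx)
      exact hrne this
    rw [hlrev, List.takeWhile_append, if_neg hlen2]
    simp
  · exact ⟨ws0.reverse, c0, by rw [hc0]; simp, hc0v⟩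
  · have hmne : ((l.dropWhile pvVowel).reverse.dropWhile pvVowel).reverse ≠ [] := by
      rw [hc0]; simp
    obtain ⟨cm, wm, hcm⟩ := List.exists_cons_of_ne_nil hmne
    refine ⟨cm, wm, hcm, ?_⟩
    have hcons := hcd.symm.trans hdeq
    rw [hcm, List.cons_append] at hcons
    have : cd = cm := by injection hcons
    rw [← this]; exact hcdv

theorem A_eq_ref (s : String) : find_almost_vowel s = pvRef s.toList := by
  simp only [find_almost_vowel, pvRef]
  generalize s.toList = l
  have hleft := pvLeftLoop_eq l 0
  rw [zero_add] at hleft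
  rw [hleft]
  by_cases hall : (l.takeWhile pvVowel).length = l.length
  · rw [if_pos (by exact_mod_cast hall), if_pos hall]
  · rw [if_neg (by exact_mod_cast hall), if_neg hall]
    have hbn : (l.reverse.takeWhile pvVowel).length ≤ l.length := by
      have h1 := (List.takeWhile_prefix (l := l.reverse) pvVowel).length_le
      simpa using h1
    have hright := pvRightLoop_eq l l.length le_rfl 0
    rw [List.take_length, zero_add] at hright
    rw [hright]
    rw [show ((l.length : Int) - ((l.reverse.takeWhile pvVowel).length : Int))
        = (((l.length - (l.reverse.takeWhile pvVowel).length : Nat)) : Int) by omega]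
    rw [PySem.List.slice_natCast, List.drop_take]
    rw [pvMidLoop_eq _ 0 0 le_rfl le_rfl]
    ring

theorem B_eq_ref (s : String) : find_almost_vowel_alt s = pvRef s.toList := by
  simp only [find_almost_vowel_alt]
  generalize s.toList = l
  have hr : (if (List.foldl pvRunsStep ([], 0) l).2 ≠ 0
      then (List.foldl pvRunsStep ([], 0) l).1 ++ [(List.foldl pvRunsStep ([], 0) l).2]
      else (List.foldl pvRunsStep ([], 0) l).1) = pvRuns l 0 := by
    simpa using pvRuns_fold l [] 0
  rw [hr]
  by_cases hall : ∀ c ∈ l, pvVowel c = true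
  · -- all-vowel (or empty) string
    have ht : l.takeWhile pvVowel = l := List.takeWhile_eq_self_iff.mpr hall
    have hruns : pvRuns l 0 = pvPushIf (l.length : Int) := by
      have h := pvRuns_vowel_prefix l [] 0 hall
      simpa [pvRuns] using h
    rw [hruns]
    rcases l with _ | ⟨c, rest⟩
    · decide
    · have hlen : ((c :: rest).length : Int) ≠ 0 := by
        simp only [List.length_cons]; push_cast; omega
      rw [show pvPushIf ((c :: rest).length : Int) = [((c :: rest).length : Int)] from by
        unfold pvPushIf; rw [if_pos hlen]]
      rw [if_pos ⟨by simp, by rw [PySem.List.pyGetD_zero_cons]⟩]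
      rw [pvRef, if_pos (by rw [ht])]
  · -- there is a consonant
    obtain ⟨t, m, tr, hl, htv, htrv, ht, htr, ⟨zs, cL, hmz, hcLv⟩, ⟨cm, wm, hcm, hcmv⟩⟩ :=
      pvDecomp l hall
    have hruns : pvRuns l 0 = pvPushIf (t.length : Int) ++ pvRuns m 0 ++ pvPushIf (tr.length : Int) := by
      conv_lhs => rw [hl, List.append_assoc]
      rw [pvRuns_vowel_prefix t (m ++ tr) 0 htv, zero_add]
      conv_lhs => rw [hmz]
      rw [pvRuns_split zs cL tr (t.length : Int) hcLv]
      have h1 : pvRuns tr 0 = pvPushIf (tr.length : Int) := by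
        have h := pvRuns_vowel_prefix tr [] 0 htrv
        simpa [pvRuns] using h
      have h2 : pvRuns (zs ++ [cL]) (t.length : Int) = pvPushIf (t.length : Int) ++ pvRuns m 0 := by
        rw [← hmz, hcm, pvRuns_cons_consonant cm wm _ hcmv, ← hcm, hmz]
      rw [h1, h2]
    have hguard : ¬ ((pvRuns l 0).length = 1
        ∧ PySem.List.pyGetD (pvRuns l 0) 0 0 = (l.length : Int)) := by
      rintro ⟨h1, h2⟩
      have hsum : (pvRuns l 0).sum = (l.countP pvVowel : Int) := by
        simpa using pvRuns_sum l 0 le_rfl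
      obtain ⟨x, hx⟩ := List.length_eq_one_iff.mp h1
      rw [hx, PySem.List.pyGetD_zero_cons] at h2
      rw [hx] at hsum
      simp only [List.sum_cons, List.sum_nil, add_zero] at hsum
      have hcount : l.countP pvVowel = l.length := by
        rw [h2] at hsum
        exact_mod_cast hsum.symm
      exact hall (List.countP_eq_length.mp hcount)
    rw [if_neg hguard]
    -- reference side
    have hml : 1 ≤ m.length := by rw [hcm]; simp
    have hlenl : l.length = t.length + m.length + tr.length := by rw [hl]; simp; omega
    have hrefneg : ¬ ((l.takeWhile pvVowel).length = l.length) := by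
      rw [← ht]; omega
    have hmid : (l.take (l.length - (l.reverse.takeWhile pvVowel).length)).drop
        ((l.takeWhile pvVowel).length) = m := by
      rw [← ht, ← htr]
      have hlen2 : l.length - tr.length = t.length + m.length := by omega
      rw [hlen2]
      conv_lhs => rw [hl]
      rw [List.append_assoc, List.take_append, List.take_of_length_le (by simp),
        List.take_append, List.take_of_length_le (by simp)]
      simp
    have href : pvRef l = (t.length : Int) + (tr.length : Int) + List.foldl max 0 (pvRuns m 0) := by
      simp only [pvRef]
      rw [if_neg hrefneg, hmid, ← ht, ← htr]
    rw [href]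
    have hpos : ∀ x ∈ pvRuns m 0, (0 : Int) ≤ x := fun x hx => le_of_lt (pvRuns_pos m 0 x le_rfl hx)
    have hLv : (match PySem.List.pyGet? l 0 with
        | some c => if pvVowel c = true then PySem.List.pyGetD (pvRuns l 0) 0 0 else 0
        | none => 0) = (t.length : Int) := by
      by_cases hta : t = []
      · have hget0 : PySem.List.pyGet? l 0 = some cm := by
          rw [hl, hta, hcm]
          simp [PySem.List.pyGet?_zero_cons]
        rw [hget0, hta]
        simp [hcmv]
      · obtain ⟨ct, wt, hct⟩ := List.exists_cons_of_ne_nil hta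
        have hget0 : PySem.List.pyGet? l 0 = some ct := by
          rw [hl, hct]
          simp [PySem.List.pyGet?_zero_cons]
        have hvt : pvVowel ct = true := htv ct (by rw [hct]; simp)
        have hA0 : ((t.length : Int)) ≠ 0 := by
          rw [hct]; simp only [List.length_cons]; push_cast; omega
        rw [hget0]
        simp only [hvt, if_true]
        rw [hruns, show pvPushIf ((t.length : Int)) = [((t.length : Int))] from by
          unfold pvPushIf; rw [if_pos hA0]]
        simp [PySem.List.pyGetD_zero_cons]
    have hRv : (match PySem.List.pyGet? l (-1) with
        | some c => if pvVowel c = true then PySem.List.pyGetD (pvRuns l 0) (-1) 0 else 0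
        | none => 0) = (tr.length : Int) := by
      by_cases htb : tr = []
      · have hgetm1 : PySem.List.pyGet? l (-1) = some cL := by
          rw [hl, htb, hmz, List.append_nil, ← List.append_assoc]
          exact PySem.List.pyGet?_neg_one_append_singleton _ _
        rw [hgetm1, htb]
        simp [hcLv]
      · obtain ⟨ys, cr, hys⟩ := (List.eq_nil_or_concat tr).resolve_left htb
        rw [List.concat_eq_append] at hys
        have hcrv : pvVowel cr = true := htrv cr (by rw [hys]; simp)
        have hgetm1 : PySem.List.pyGet? l (-1) = some cr := by
          rw [hl, hys, ← List.append_assoc]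
          exact PySem.List.pyGet?_neg_one_append_singleton _ _
        have hB0 : ((tr.length : Int)) ≠ 0 := by
          rw [hys]; simp only [List.length_append, List.length_cons, List.length_nil]
          push_cast; omega
        rw [hgetm1]
        simp only [hcrv, if_true]
        rw [hruns, show pvPushIf ((tr.length : Int)) = [((tr.length : Int))] from by
          unfold pvPushIf; rw [if_pos hB0]]
        exact PySem.List.pyGetD_neg_one_append_singleton _ _ _
    rw [hLv, hRv, hruns, pvInterior, pvMaxD_eq_foldl _ hpos]

-- ===== VERDICT (by name: the statement is the Claim_ definition above) =====
theorem find_almost_vowel_spec : Claim_equal_find_almost_vowel := by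
  intro s _
  show find_almost_vowel s = find_almost_vowel_alt s
  rw [A_eq_ref, B_eq_ref]
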